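-- pv_equiv track=rewrite | github.com/Vurchas-A-Tomar/Programmes | Python Course/Let Us Python/Ch - 13 ; Functions/P 13.9.py | create_sent1
-- ===== SOURCE A (Python) =====
-- def create_sent1(s1, s2, s3):
--     lst = []
--
--     for w1 in s1:
--         for w2 in s2:
--             for w3 in s3:
--                 sent_ = f'{w1} {w2} {w3}'
--                 lst.append(sent_)
--
--     return lst
-- ===== SOURCE B (Python) =====
-- def create_sent1(s1, s2, s3):
--     # Generic recursive n-way Cartesian sentence builder: the suffix
--     # combinations of the remaining word lists are built once (recursively,
--     # right-to-left), then every word of the first list is prefixed to them.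
--     def combos(lists):
--         if len(lists) == 1:
--             return [f'{w}' for w in lists[0]]
--         rest = combos(lists[1:])
--         return [f'{w} {t}' for w in lists[0] for t in rest]
--     return combos([s1, s2, s3])
-- ===== Notes on version B (the rewrite author's own statement) =====
-- stated objective: alternative
-- what changed: Replaces the fixed triple-nested append loop by a generic recursive n-way product: the suffix combinations of the remaining lists are computed once by recursion (right-to-left) and each word of the head list is prefixed to that shared suffix table.
import Mathlib
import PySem

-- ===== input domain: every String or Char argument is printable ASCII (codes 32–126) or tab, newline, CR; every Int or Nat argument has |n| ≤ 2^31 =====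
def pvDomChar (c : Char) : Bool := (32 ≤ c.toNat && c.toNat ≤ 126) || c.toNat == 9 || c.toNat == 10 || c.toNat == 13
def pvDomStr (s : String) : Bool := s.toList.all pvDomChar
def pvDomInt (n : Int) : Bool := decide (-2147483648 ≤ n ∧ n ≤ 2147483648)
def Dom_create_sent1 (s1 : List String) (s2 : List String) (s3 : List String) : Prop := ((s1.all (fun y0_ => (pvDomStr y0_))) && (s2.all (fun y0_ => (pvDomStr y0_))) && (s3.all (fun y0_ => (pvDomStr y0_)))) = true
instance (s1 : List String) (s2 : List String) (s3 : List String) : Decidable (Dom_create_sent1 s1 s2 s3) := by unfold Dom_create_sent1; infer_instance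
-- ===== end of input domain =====

-- B replaces the fixed triple-nested loop by a generic recursive n-way product:
-- suffix combinations of the tail lists are built once, then prefixed with the head list.

-- ===== PORT A =====
-- triple nested loop appending one sentence at a time
def create_sent1 (s1 : List String) (s2 : List String) (s3 : List String) : List String :=
  s1.foldl (fun lst w1 =>
    s2.foldl (fun lst w2 =>
      s3.foldl (fun lst w3 =>
        lst ++ [w1 ++ " " ++ w2 ++ " " ++ w3]) lst) lst) []

-- ===== PORT B =====
-- def combos(lists): base case len==1, else prefix head words to combos(tail)
def combosB : List (List String) → List String
  | [] => []                                   -- unreachable (combos is never called on [])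
  | [xs] => xs.map (fun w => w)
  | xs :: rest => xs.flatMap (fun w => (combosB rest).map (fun t => w ++ " " ++ t))

def create_sent1_alt (s1 : List String) (s2 : List String) (s3 : List String) : List String :=
  combosB [s1, s2, s3]

-- ===== PRECONDITION & SPEC =====
def Spec_create_sent1 (s1 : List String) (s2 : List String) (s3 : List String) (out : List String) : Prop := out = create_sent1_alt s1 s2 s3
instance (s1 : List String) (s2 : List String) (s3 : List String) (out : List String) : Decidable (Spec_create_sent1 s1 s2 s3 out) := by unfold Spec_create_sent1; infer_instance

-- ===== CLAIM (what is proved, stated in full; the proofs are below) =====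
def Claim_equal_create_sent1 : Prop := ∀ (s1 : List String) (s2 : List String) (s3 : List String), Dom_create_sent1 s1 s2 s3 → Spec_create_sent1 s1 s2 s3 (create_sent1 s1 s2 s3)

-- ===== LEMMAS AND PROOFS =====
theorem create_sent1_eq_alt (s1 s2 s3 : List String) :
    create_sent1 s1 s2 s3 = create_sent1_alt s1 s2 s3 := by
  unfold create_sent1 create_sent1_alt
  simp only [PySem.List.foldl_append_singleton_eq_map, PySem.List.foldl_append_eq_flatMap]
  simp only [combosB, List.map_flatMap, List.map_map, Function.comp_def]
  rw [List.nil_append]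
  congr 1; funext w1; congr 1; funext w2; congr 1; funext w3
  simp [String.append_assoc]

-- ===== VERDICT (by name: the statement is the Claim_ definition above) =====
theorem create_sent1_spec : Claim_equal_create_sent1 := by
  intro s1 s2 s3 _
  exact create_sent1_eq_alt s1 s2 s3
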